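-- pv_equiv track=rewrite | github.com/Andre-42/Battleship-in-Python | run.py | create_scoreboards
-- ===== SOURCE A (Python) =====
-- def create_scoreboards(max_letter_x, col_name_x, max_number_y):
--     """
--     This function creates a list with all valid target entries available on the board.
--     not_hit: stringlist: a1, a2, ...
--     field_index: numerical index of board matrix: 0..number of fields-1
--     field_x: column coordinates for not_hit elements
--     field_y: row coordinates for not_hit elements
--     """
--     n_el = max_letter_x * max_number_y
--     not_hit = [None] * n_el
--     field_index = [None] * n_el
--     field_x = [None] * n_el
--     field_y = [None] * n_el
--     it_list = 0
--     for j in range(max_letter_x):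
--         for i in range(max_number_y):
--             not_hit[it_list] = col_name_x[j] + str(i+1)
--             field_index[it_list] = it_list
--             field_x[it_list] = j
--             field_y[it_list] = i
--             it_list += 1
--     return not_hit, field_index, field_x, field_y
-- ===== SOURCE B (Python) =====
-- def create_scoreboards(max_letter_x, col_name_x, max_number_y):
--     """Staged whole-list construction: an empty board returns immediately;
--     otherwise each scoreboard is built independently (field_index as one range,
--     field_y by list repetition, field_x by concatenating per-column replicated
--     blocks) and not_hit is then derived by zipping the two coordinate lists --
--     no preallocation, no running counter."""
--     if max_letter_x <= 0 or max_number_y <= 0: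
--         return [], [], [], []
--     field_index = list(range(max_letter_x * max_number_y))
--     field_y = list(range(max_number_y)) * max_letter_x
--     field_x = []
--     for j in range(max_letter_x):
--         field_x += [j] * max_number_y
--     not_hit = [col_name_x[x] + str(y + 1) for x, y in zip(field_x, field_y)]
--     return not_hit, field_index, field_x, field_y
-- ===== Notes on version B (the rewrite author's own statement) =====
-- stated objective: alternative
-- what changed: Instead of one fused nested pass filling four preallocated arrays with a running counter, B builds each list independently by whole-list operations (field_index as a single range, field_y by list repetition, field_x by concatenating per-column replicated blocks) and derives not_hit by zipping the two coordinate lists.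
-- outside the precondition, e.g. on create_scoreboards(-1, ['', 'a'], -1): A returns ([None], [None], [None], [None]), B returns ([], [], [], [])
import Mathlib
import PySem

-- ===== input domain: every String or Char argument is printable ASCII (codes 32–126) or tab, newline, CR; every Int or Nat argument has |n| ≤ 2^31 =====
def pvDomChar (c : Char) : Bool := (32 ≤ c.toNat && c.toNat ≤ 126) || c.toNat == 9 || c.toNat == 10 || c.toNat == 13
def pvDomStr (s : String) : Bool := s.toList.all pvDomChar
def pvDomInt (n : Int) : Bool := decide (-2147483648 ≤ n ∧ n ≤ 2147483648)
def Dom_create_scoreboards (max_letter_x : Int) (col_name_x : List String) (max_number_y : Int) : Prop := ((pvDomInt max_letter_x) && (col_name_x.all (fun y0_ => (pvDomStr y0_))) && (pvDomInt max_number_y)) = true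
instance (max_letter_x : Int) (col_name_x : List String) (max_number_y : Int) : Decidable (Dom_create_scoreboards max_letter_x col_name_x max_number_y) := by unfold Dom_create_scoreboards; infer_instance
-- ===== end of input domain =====

-- B replaces A's single fused nested pass (preallocated lists + running counter) by
-- four independent whole-list constructions, with not_hit derived by zipping the
-- coordinate lists (objective: alternative).

-- ===== PORT A =====
-- A preallocates [None]*n_el lists and fills them by index writes; we model the cells
-- as Option values and strip the Option at the return (exact under Pre_: there every
-- cell is written exactly once and every index write / col_name_x[j] read is in range).
-- the inner loop body of A (one named helper; writes the four cells and bumps it_list)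
def pvStepA (col_name_x : List String) (j : Int)
    (st : List (Option String) × List (Option Int) × List (Option Int) × List (Option Int) × Int) (i : Int) :
    List (Option String) × List (Option Int) × List (Option Int) × List (Option Int) × Int :=
  match st with
  | (nh, fi, fx, fy, it) =>
    (nh.set it.toNat (some (PySem.List.pyGetD col_name_x j "" ++ PySem.Int.toStr (i + 1))),
     fi.set it.toNat (some it),
     fx.set it.toNat (some j),
     fy.set it.toNat (some i),
     it + 1)

def create_scoreboards (max_letter_x : Int) (col_name_x : List String) (max_number_y : Int) : List String × List Int × List Int × List Int :=
  let n_el := max_letter_x * max_number_y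
  let not_hit : List (Option String) := List.replicate n_el.toNat none
  let field_index : List (Option Int) := List.replicate n_el.toNat none
  let field_x : List (Option Int) := List.replicate n_el.toNat none
  let field_y : List (Option Int) := List.replicate n_el.toNat none
  let st :=
    (PySem.List.pyRange 0 max_letter_x 1).foldl
      (fun st j => (PySem.List.pyRange 0 max_number_y 1).foldl (pvStepA col_name_x j) st)
      (not_hit, field_index, field_x, field_y, (0 : Int))
  (st.1.map (fun o => o.getD ""), st.2.1.map (fun o => o.getD 0),
   st.2.2.1.map (fun o => o.getD 0), st.2.2.2.1.map (fun o => o.getD 0))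

-- ===== PORT B =====
-- Source B: field_index = list(range(mx*my)); field_y = list(range(my)) * mx (Python
-- list*int repeats, empty for a non-positive count: exact as replicate+flatten);
-- an empty board returns immediately; field_x = per-column blocks [j]*my concatenated; not_hit by zipping field_x/field_y
-- (col_name_x[x] with x ≥ 0: pyGetD with a default, exact under Pre_).
def create_scoreboards_alt (max_letter_x : Int) (col_name_x : List String) (max_number_y : Int) : List String × List Int × List Int × List Int :=
  if max_letter_x ≤ 0 ∨ max_number_y ≤ 0 then ([], [], [], []) else
  let field_index := PySem.List.pyRange 0 (max_letter_x * max_number_y) 1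
  let field_y := (List.replicate max_letter_x.toNat (PySem.List.pyRange 0 max_number_y 1)).flatten
  let field_x := (PySem.List.pyRange 0 max_letter_x 1).foldl
    (fun acc j => acc ++ List.replicate max_number_y.toNat j) ([] : List Int)
  let not_hit := (field_x.zip field_y).map
    (fun p => PySem.List.pyGetD col_name_x p.1 "" ++ PySem.Int.toStr (p.2 + 1))
  (not_hit, field_index, field_x, field_y)

-- ===== PRECONDITION & SPEC =====
-- Pre_ excludes (a) both dimensions negative, where A returns lists of None (not values
-- of the declared type), and (b) positive dimensions with fewer column names than
-- max_letter_x, where A raises IndexError.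
def Pre_create_scoreboards (max_letter_x : Int) (col_name_x : List String) (max_number_y : Int) : Prop :=
  ¬ (max_letter_x < 0 ∧ max_number_y < 0) ∧
  (0 < max_letter_x ∧ 0 < max_number_y → max_letter_x ≤ (col_name_x.length : Int))
instance (max_letter_x : Int) (col_name_x : List String) (max_number_y : Int) : Decidable (Pre_create_scoreboards max_letter_x col_name_x max_number_y) := by unfold Pre_create_scoreboards; infer_instance

def pvWitness_create_scoreboards : Int × List String × Int := (2, ["a", "b"], 3)

def Spec_create_scoreboards (max_letter_x : Int) (col_name_x : List String) (max_number_y : Int) (out : List String × List Int × List Int × List Int) : Prop := out = create_scoreboards_alt max_letter_x col_name_x max_number_y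
instance (max_letter_x : Int) (col_name_x : List String) (max_number_y : Int) (out : List String × List Int × List Int × List Int) : Decidable (Spec_create_scoreboards max_letter_x col_name_x max_number_y out) := by unfold Spec_create_scoreboards; infer_instance

-- ===== CLAIM (what is proved, stated in full; the proofs are below) =====
def Claim_equal_create_scoreboards : Prop := ∀ (max_letter_x : Int) (col_name_x : List String) (max_number_y : Int), Dom_create_scoreboards max_letter_x col_name_x max_number_y → Pre_create_scoreboards max_letter_x col_name_x max_number_y → Spec_create_scoreboards max_letter_x col_name_x max_number_y (create_scoreboards max_letter_x col_name_x max_number_y)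

-- ===== LEMMAS AND PROOFS =====

theorem pvWitness_ok : Dom_create_scoreboards pvWitness_create_scoreboards.1 pvWitness_create_scoreboards.2.1 pvWitness_create_scoreboards.2.2 ∧ Pre_create_scoreboards pvWitness_create_scoreboards.1 pvWitness_create_scoreboards.2.1 pvWitness_create_scoreboards.2.2 := by
  decide

-- the j-major grid as one flat list
def pvGrid {α : Type} (f : Nat → Nat → α) (k m : Nat) : List α :=
  (List.range k).flatMap (fun j => (List.range m).map (f j))

theorem pvGrid_succ {α : Type} (f : Nat → Nat → α) (k m : Nat) :
    pvGrid f (k + 1) m = pvGrid f k m ++ (List.range m).map (f k) := by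
  simp [pvGrid, List.range_succ]

theorem pvGrid_length {α : Type} (f : Nat → Nat → α) (k m : Nat) :
    (pvGrid f k m).length = k * m := by
  induction k with
  | zero => simp [pvGrid]
  | succ k ih => rw [pvGrid_succ]; simp [ih]; ring

theorem pvGrid_map {α β : Type} (f : Nat → Nat → α) (h : α → β) (k m : Nat) :
    (pvGrid f k m).map h = pvGrid (fun j i => h (f j i)) k m := by
  simp [pvGrid, List.map_flatMap, List.map_map]
  rfl

-- setting the cell just past a length-t prefix
theorem pvSet_mid {α : Type} (p q : List α) (t : Nat) (hp : p.length = t) (hq : 0 < q.length) (v : α) :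
    (p ++ q).set t v = (p ++ [v]) ++ q.tail := by
  rw [List.set_append, if_neg (by omega), hp, Nat.sub_self]
  cases q with
  | nil => simp at hq
  | cons a q => simp

-- A's inner loop: m writes starting at position t fill the next m cells
theorem foldl_stepA (cols : List String) (j : Int) (m : Nat) :
    ∀ (t : Nat) (pn qn : List (Option String)) (pf px py qf qx qy : List (Option Int)),
    pn.length = t → pf.length = t → px.length = t → py.length = t →
    m ≤ qn.length → m ≤ qf.length → m ≤ qx.length → m ≤ qy.length →
    ((List.range m).map (fun (i : Nat) => (i : Int))).foldl (pvStepA cols j)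
        (pn ++ qn, pf ++ qf, px ++ qx, py ++ qy, (t : Int)) =
      (pn ++ (List.range m).map (fun (i : Nat) => some (PySem.List.pyGetD cols j "" ++ PySem.Int.toStr ((i : Int) + 1))) ++ qn.drop m,
       pf ++ (List.range m).map (fun (i : Nat) => some ((t : Int) + (i : Int))) ++ qf.drop m,
       px ++ (List.range m).map (fun _ => some j) ++ qx.drop m,
       py ++ (List.range m).map (fun (i : Nat) => some ((i : Int))) ++ qy.drop m,
       (t : Int) + (m : Int)) := by
  induction m with
  | zero => intro t pn qn pf px py qf qx qy h1 h2 h3 h4 _ _ _ _; simp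
  | succ m ih =>
    intro t pn qn pf px py qf qx qy h1 h2 h3 h4 hqn hqf hqx hqy
    rw [List.range_succ, List.map_append, List.foldl_append,
        ih t pn qn pf px py qf qx qy h1 h2 h3 h4 (by omega) (by omega) (by omega) (by omega)]
    simp only [List.map_cons, List.map_nil, List.foldl_cons, List.foldl_nil, pvStepA]
    have htn : ((t : Int) + (m : Int)).toNat = t + m := by omega
    rw [htn]
    have lnh : (pn ++ (List.range m).map (fun (i : Nat) => some (PySem.List.pyGetD cols j "" ++ PySem.Int.toStr ((i : Int) + 1)))).length = t + m := by simp [h1]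
    have lfi : (pf ++ (List.range m).map (fun (i : Nat) => some ((t : Int) + (i : Int)))).length = t + m := by simp [h2]
    have lfx : (px ++ (List.range m).map (fun _ => some j)).length = t + m := by simp [h3]
    have lfy : (py ++ (List.range m).map (fun (i : Nat) => some ((i : Int)))).length = t + m := by simp [h4]
    rw [pvSet_mid _ _ _ lnh (by simp; omega) _,
        pvSet_mid _ _ _ lfi (by simp; omega) _,
        pvSet_mid _ _ _ lfx (by simp; omega) _,
        pvSet_mid _ _ _ lfy (by simp; omega) _]
    rw [List.tail_drop, List.tail_drop, List.tail_drop, List.tail_drop]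
    simp only [List.map_append, List.map_cons, List.map_nil]
    simp only [Prod.mk.injEq]
    refine ⟨?_, ?_, ?_, ?_, by push_cast; ring⟩ <;> simp [List.append_assoc]

-- A's outer loop on fresh replicate-none boards
theorem foldl_outerA (cols : List String) (m : Nat) :
    ∀ (k n : Nat), k * m ≤ n →
    ((List.range k).map (fun (j : Nat) => (j : Int))).foldl
      (fun st j => ((List.range m).map (fun (i : Nat) => (i : Int))).foldl (pvStepA cols j) st)
      (List.replicate n none, List.replicate n none, List.replicate n none, List.replicate n none, (0 : Int)) =
    (pvGrid (fun j i => some (PySem.List.pyGetD cols (j : Int) "" ++ PySem.Int.toStr ((i : Int) + 1))) k m ++ List.replicate (n - k * m) none,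
     pvGrid (fun j i => some ((j * m + i : Nat) : Int)) k m ++ List.replicate (n - k * m) none,
     pvGrid (fun j i => some ((j : Int))) k m ++ List.replicate (n - k * m) none,
     pvGrid (fun j i => some ((i : Int))) k m ++ List.replicate (n - k * m) none,
     ((k * m : Nat) : Int)) := by
  intro k
  induction k with
  | zero => intro n _; simp [pvGrid]
  | succ k ih =>
    intro n h
    have h' : k * m + m ≤ n := by rw [Nat.succ_mul] at h; exact h
    rw [List.range_succ, List.map_append, List.foldl_append, ih n (by omega)]
    simp only [List.map_cons, List.map_nil, List.foldl_cons, List.foldl_nil]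
    rw [foldl_stepA cols (k : Int) m (k * m)
        _ _ _ _ _ _ _ _
        (by rw [pvGrid_length]) (by rw [pvGrid_length]) (by rw [pvGrid_length]) (by rw [pvGrid_length])
        (by simp; omega) (by simp; omega) (by simp; omega) (by simp; omega)]
    rw [List.drop_replicate]
    have hrep : n - k * m - m = n - (k + 1) * m := by rw [Nat.succ_mul]; omega
    rw [hrep]
    have hmap : (List.range m).map (fun (i : Nat) => some (((k * m : Nat) : Int) + (i : Int))) =
             (List.range m).map (fun (i : Nat) => some (((k * m + i : Nat) : Int))) := by
      apply List.map_congr_left; intro i _; push_cast; ring_nf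
    rw [pvGrid_succ, pvGrid_succ, pvGrid_succ, pvGrid_succ, hmap]
    simp only [Prod.mk.injEq]
    refine ⟨by simp [List.append_assoc]; try exact hrep, by simp [List.append_assoc]; try exact hrep, by simp [List.append_assoc]; try exact hrep,
            by simp [List.append_assoc]; try exact hrep, by rw [Nat.succ_mul]; push_cast; ring⟩

-- B-side lemmas: each staged construction equals the corresponding grid

-- list repetition: flatten (replicate k L) is the grid whose block is L, row-independent
theorem pvFlatten_replicate {α : Type} (k m : Nat) (g : Nat → α) :
    (List.replicate k ((List.range m).map g)).flatten = pvGrid (fun _ i => g i) k m := by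
  induction k with
  | zero => simp [pvGrid]
  | succ k ih =>
    rw [List.replicate_succ', List.flatten_append, ih, pvGrid_succ]
    simp

-- per-column blocks: folding 'acc ++ [j]*m' over the columns is the column grid
theorem pvFoldl_blocks (k m : Nat) (init : List Int) :
    ((List.range k).map (fun (j : Nat) => (j : Int))).foldl
      (fun acc j => acc ++ List.replicate m j) init =
    init ++ pvGrid (fun j _ => (j : Int)) k m := by
  induction k generalizing init with
  | zero => simp [pvGrid]
  | succ k ih =>
    rw [List.range_succ, List.map_append, List.foldl_append, ih]
    simp only [List.map_cons, List.map_nil, List.foldl_cons, List.foldl_nil]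
    rw [pvGrid_succ, ← List.append_assoc]
    congr 1
    simp [List.map_const']

-- zipping two grids of the same shape zips cellwise
theorem pvGrid_zip {α β : Type} (f : Nat → Nat → α) (g : Nat → Nat → β) (k m : Nat) :
    (pvGrid f k m).zip (pvGrid g k m) = pvGrid (fun j i => (f j i, g j i)) k m := by
  induction k with
  | zero => simp [pvGrid]
  | succ k ih =>
    rw [pvGrid_succ, pvGrid_succ, pvGrid_succ,
        List.zip_append (by rw [pvGrid_length, pvGrid_length]), ih, List.zip_map']

-- the flat-index grid is just a range
theorem pvGrid_index (k m : Nat) :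
    pvGrid (fun j i => ((j * m + i : Nat) : Int)) k m = (List.range (k * m)).map (fun (l : Nat) => (l : Int)) := by
  induction k with
  | zero => simp [pvGrid]
  | succ k ih =>
    rw [pvGrid_succ, ih]
    have : (k + 1) * m = k * m + m := by ring
    rw [this, List.range_add, List.map_append, List.map_map]
    congr 1

-- A and B agree for nonnegative dimensions with m ≠ 0
theorem main_pos (k m : Nat) (cols : List String) (hk0 : 0 < k) (hm0 : 0 < m) :
    create_scoreboards (k : Int) cols (m : Int) = create_scoreboards_alt (k : Int) cols (m : Int) := by
  have hmul : ((k : Int) * (m : Int)) = ((k * m : Nat) : Int) := by push_cast; ring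
  -- A side
  have hA :
      create_scoreboards (k : Int) cols (m : Int) =
      (pvGrid (fun j i => PySem.List.pyGetD cols (j : Int) "" ++ PySem.Int.toStr ((i : Int) + 1)) k m,
       pvGrid (fun j i => ((j * m + i : Nat) : Int)) k m,
       pvGrid (fun j i => ((j : Int))) k m,
       pvGrid (fun j i => ((i : Int))) k m) := by
    unfold create_scoreboards
    rw [hmul]
    simp only [Int.toNat_natCast, PySem.List.pyRange_zero_natCast]
    rw [foldl_outerA cols m k (k * m) (le_refl _)]
    simp [pvGrid_map]
  -- B side
  have hB :
      create_scoreboards_alt (k : Int) cols (m : Int) =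
      (pvGrid (fun j i => PySem.List.pyGetD cols (j : Int) "" ++ PySem.Int.toStr ((i : Int) + 1)) k m,
       pvGrid (fun j i => ((j * m + i : Nat) : Int)) k m,
       pvGrid (fun j i => ((j : Int))) k m,
       pvGrid (fun j i => ((i : Int))) k m) := by
    unfold create_scoreboards_alt
    rw [if_neg (by push_neg; constructor <;> [exact_mod_cast hk0; exact_mod_cast hm0]), hmul]
    simp only [Int.toNat_natCast, PySem.List.pyRange_zero_natCast]
    rw [pvFlatten_replicate k m (fun (i : Nat) => (i : Int)),
        pvFoldl_blocks k m [], List.nil_append,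
        pvGrid_zip, pvGrid_map, pvGrid_index]
  rw [hA, hB]

-- A and B both produce the empty quadruple when a dimension is ≤ 0 (and not both < 0)
theorem main_degenerate (mx my : Int) (cols : List String) (hle : mx * my ≤ 0) (hor : mx ≤ 0 ∨ my ≤ 0) :
    create_scoreboards mx cols my = create_scoreboards_alt mx cols my := by
  have htn : (mx * my).toNat = 0 := by omega
  have hA : create_scoreboards mx cols my = ([], [], [], []) := by
    simp only [create_scoreboards]
    rw [htn]
    rcases hor with h | h
    · rw [PySem.List.pyRange_one_eq_nil h]
      rfl
    · rw [PySem.List.pyRange_one_eq_nil h]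
      simp
  have hB : create_scoreboards_alt mx cols my = ([], [], [], []) := by
    simp only [create_scoreboards_alt]
    rw [if_pos hor]
  rw [hA, hB]

-- ===== VERDICT (by name: the statement is the Claim_ definition above) =====
theorem create_scoreboards_spec : Claim_equal_create_scoreboards := by
  intro mx cols my _ hpre
  unfold Spec_create_scoreboards
  by_cases hpos : 0 < mx ∧ 0 < my
  · obtain ⟨hmx, hmy⟩ := hpos
    have hk : mx = ((mx.toNat : Nat) : Int) := (Int.toNat_of_nonneg (le_of_lt hmx)).symm
    have hm : my = ((my.toNat : Nat) : Int) := (Int.toNat_of_nonneg (le_of_lt hmy)).symm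
    rw [hk, hm]
    exact main_pos mx.toNat my.toNat cols (by omega) (by omega)
  · have hor : mx ≤ 0 ∨ my ≤ 0 := by
      by_contra hcon; push_neg at hcon; exact hpos ⟨hcon.1, hcon.2⟩
    have hle : mx * my ≤ 0 := by
      have hnn := hpre.1
      push_neg at hpos
      rcases hor with h | h
      · by_cases h1 : 0 ≤ my
        · exact mul_nonpos_of_nonpos_of_nonneg h h1
        · have h0 : mx = 0 := by
            by_contra h2
            exact hnn ⟨by omega, by omega⟩
          simp [h0]
      · by_cases h1 : 0 ≤ mx
        · exact mul_nonpos_of_nonneg_of_nonpos h1 h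
        · have h0 : my = 0 := by
            by_contra h2
            exact hnn ⟨by omega, by omega⟩
          simp [h0]
    exact main_degenerate mx my cols hle hor
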